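-- pv_equiv track=rewrite | github.com/Hosseincpl/Code_Challenge | Day #10/10.3.py | findMin
-- ===== SOURCE A (Python) =====
-- def findMin(digitLen, sum):
--     count = 0
--     minList = [0] * digitLen
--     if sum > digitLen*9 or (sum == 0 and digitLen > 1):
--         return -1
--     sum -= 1
--     for index in range(digitLen-1, 0, -1):
--         if sum > 9:
--             minList[index] = 9
--             sum -= 9
--         else:
--             minList[index] = sum
--             sum = 0
--     minList[0] = sum +1
--     for index in range(digitLen):
--         count = count * 10 + minList[index]
--     return count
-- ===== SOURCE B (Python) =====
-- def findMin(digitLen, sum):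
--     # closed form: the tail of A's greedy is q nines, one digit r, zeros, so
--     # the answer is assembled arithmetically instead of by filling a list.
--     if sum > digitLen * 9 or (sum == 0 and digitLen > 1):
--         return -1
--     s = sum - 1
--     t = digitLen - 1
--     q = max(0, min(t, (s - 1) // 9))
--     if q == t:
--         return (s - 9 * t + 1) * 10 ** t + (10 ** t - 1)
--     return 10 ** t + (s - 9 * q) * 10 ** q + (10 ** q - 1)
-- ===== Notes on version B (the rewrite author's own statement) =====
-- stated objective: alternative
-- what changed: A fills a mutable digit list tail-first in a loop and then assembles it base 10 in a second loop; B computes the same number in closed form (clamped nine-count q = max(0, min(digitLen-1, (sum-2)//9)), one middle digit, powers of ten) with no loop over positions.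
import Mathlib
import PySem

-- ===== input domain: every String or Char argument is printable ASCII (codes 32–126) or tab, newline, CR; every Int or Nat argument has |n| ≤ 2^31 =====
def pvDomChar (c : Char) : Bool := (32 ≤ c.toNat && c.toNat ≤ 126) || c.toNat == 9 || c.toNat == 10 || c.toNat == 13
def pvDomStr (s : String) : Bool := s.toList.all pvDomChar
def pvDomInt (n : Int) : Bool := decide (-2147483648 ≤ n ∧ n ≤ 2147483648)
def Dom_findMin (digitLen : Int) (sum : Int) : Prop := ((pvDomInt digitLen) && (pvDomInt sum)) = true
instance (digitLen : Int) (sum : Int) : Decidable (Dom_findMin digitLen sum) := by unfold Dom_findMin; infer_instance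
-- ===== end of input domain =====

-- B replaces A's tail-filling greedy loop over a mutable digit list by a closed arithmetic
-- formula (number of trailing nines q, one middle digit, powers of ten); objective: alternative.

-- ===== PORT A =====
-- literal transliteration of A: build [0]*digitLen, fill indices digitLen-1..1 greedily from the
-- tail, set index 0, then assemble base 10.  minList[index]=v is pySetD (exact: the loop's indices
-- are always in range); minList[0]=v on the empty list (Python IndexError) is excluded by Pre_.
def findMin (digitLen : Int) (sum : Int) : Int :=
  if sum > digitLen * 9 ∨ (sum = 0 ∧ digitLen > 1) then -1
  else
    let s0 := sum - 1
    let st := (PySem.List.pyRange (digitLen - 1) 0 (-1)).foldl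
      (fun (st : List Int × Int) index =>
        if st.2 > 9 then (PySem.List.pySetD st.1 index 9, st.2 - 9)
        else (PySem.List.pySetD st.1 index st.2, 0))
      (List.replicate digitLen.toNat 0, s0)
    let l := PySem.List.pySetD st.1 0 (st.2 + 1)
    (PySem.List.pyRange 0 digitLen 1).foldl
      (fun count index => count * 10 + PySem.List.pyGetD l index 0) 0

-- ===== PORT B =====
-- literal transliteration of Source B; Python's 10 ** t, 10 ** q are ported with .toNat exponents,
-- exact since t ≥ 0 and q ≥ 0 whenever the guard falls through inside Pre_.
def findMin_alt (digitLen : Int) (sum : Int) : Int :=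
  if sum > digitLen * 9 ∨ (sum = 0 ∧ digitLen > 1) then -1
  else
    let s := sum - 1
    let t := digitLen - 1
    let q := max 0 (min t (PySem.Int.floordiv (s - 1) 9))
    if q = t then (s - 9 * t + 1) * 10 ^ t.toNat + (10 ^ t.toNat - 1)
    else 10 ^ t.toNat + (s - 9 * q) * 10 ^ q.toNat + (10 ^ q.toNat - 1)

-- ===== PRECONDITION & SPEC =====
-- Pre_ excludes exactly the inputs (digitLen ≤ 0 together with sum ≤ 9*digitLen) on which A's
-- `minList[0] = sum + 1` indexes the empty list and raises IndexError.
def Pre_findMin (digitLen : Int) (sum : Int) : Prop := 1 ≤ digitLen ∨ 9 * digitLen < sum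
instance (digitLen : Int) (sum : Int) : Decidable (Pre_findMin digitLen sum) := by
  unfold Pre_findMin; infer_instance
def pvWitness_findMin : Int × Int := (3, 11)

def Spec_findMin (digitLen : Int) (sum : Int) (out : Int) : Prop := out = findMin_alt digitLen sum
instance (digitLen : Int) (sum : Int) (out : Int) : Decidable (Spec_findMin digitLen sum out) := by
  unfold Spec_findMin; infer_instance

-- ===== CLAIM (what is proved, stated in full; the proofs are below) =====
def Claim_equal_findMin : Prop := ∀ (digitLen : Int) (sum : Int), Dom_findMin digitLen sum →
  Pre_findMin digitLen sum → Spec_findMin digitLen sum (findMin digitLen sum)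

-- ===== LEMMAS AND PROOFS =====

-- digits A's fill loop writes, in processing order (index digitLen-1 first), plus the final sum
def revFill : Nat → Int → List Int × Int
  | 0, s => ([], s)
  | k + 1, s =>
    if s > 9 then ((9 : Int) :: (revFill k (s - 9)).1, (revFill k (s - 9)).2)
    else (s :: (revFill k 0).1, (revFill k 0).2)

def b10 (l : List Int) : Int := l.foldl (fun c x => c * 10 + x) 0

-- B's nine-count and closed form, with t = (k : Int)
def qB (k : Nat) (s : Int) : Int := max 0 (min (k : Int) ((s - 1) / 9))

def closedB (k : Nat) (s : Int) : Int :=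
  if qB k s = (k : Int) then (s - 9 * (k : Int) + 1) * 10 ^ k + (10 ^ k - 1)
  else 10 ^ k + (s - 9 * qB k s) * 10 ^ (qB k s).toNat + (10 ^ (qB k s).toNat - 1)

theorem revFill_zero (k : Nat) : revFill k 0 = (List.replicate k 0, 0) := by
  induction k with
  | zero => rfl
  | succ k ih => simp [revFill, ih, List.replicate_succ]

theorem length_revFill (k : Nat) (s : Int) : (revFill k s).1.length = k := by
  induction k generalizing s with
  | zero => rfl
  | succ k ih => simp only [revFill]; split <;> simp [ih]

theorem foldl_b10_replicate (k : Nat) (c : Int) :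
    (List.replicate k (0 : Int)).foldl (fun c x => c * 10 + x) c = c * 10 ^ k := by
  induction k generalizing c with
  | zero => simp
  | succ k ih => simp [List.replicate_succ, ih, pow_succ]; ring

-- base-10 assembly of the fill result equals B's closed form
theorem b10_revFill (k : Nat) (s : Int) :
    b10 (((revFill k s).2 + 1) :: (revFill k s).1.reverse) = closedB k s := by
  induction k generalizing s with
  | zero =>
    have hq : qB 0 s = 0 := by unfold qB; omega
    simp [revFill, b10, closedB, hq]
  | succ k ih =>
    by_cases hs : s > 9
    · have h1 : revFill (k + 1) s = (9 :: (revFill k (s - 9)).1, (revFill k (s - 9)).2) := by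
        simp [revFill, hs]
      rw [h1]
      have h2 : ((revFill k (s-9)).2 + 1) :: (9 :: (revFill k (s-9)).1).reverse
          = (((revFill k (s-9)).2 + 1) :: (revFill k (s-9)).1.reverse) ++ [9] := by
        simp
      rw [h2]
      unfold b10
      rw [List.foldl_append]
      have hihl := ih (s - 9)
      unfold b10 at hihl
      rw [hihl]
      show closedB k (s - 9) * 10 + 9 = closedB (k + 1) s
      have hqeq : qB (k + 1) s = qB k (s - 9) + 1 := by unfold qB; push_cast; omega
      unfold closedB
      by_cases hc : qB k (s - 9) = (k : Int)
      · rw [if_pos hc, if_pos (by rw [hqeq, hc]; push_cast; ring)]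
        rw [pow_succ]; push_cast; ring
      · have hq0 : (0:Int) ≤ qB k (s - 9) := by unfold qB; omega
        rw [if_neg hc, if_neg (by push_cast; omega), hqeq]
        have htn : (qB k (s - 9) + 1).toNat = (qB k (s - 9)).toNat + 1 := by omega
        rw [htn, pow_succ, pow_succ]
        ring
    · have h1 : revFill (k + 1) s = (s :: (revFill k 0).1, (revFill k 0).2) := by
        simp [revFill, hs]
      rw [h1, revFill_zero]
      simp only [List.reverse_cons, List.reverse_replicate]
      unfold b10
      rw [show ((0:Int)+1) :: (List.replicate k (0:Int) ++ [s])
            = (((0:Int)+1) :: List.replicate k (0:Int)) ++ [s] by simp]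
      rw [List.foldl_append]
      simp only [List.foldl_cons, List.foldl_nil]
      rw [foldl_b10_replicate]
      have hq : qB (k + 1) s = 0 := by unfold qB; push_cast; omega
      have hne : qB (k + 1) s ≠ ((k:Int) + 1) := by rw [hq]; omega
      unfold closedB
      rw [if_neg (by push_cast at hne ⊢; exact hne), hq]
      simp [pow_succ]

-- A's fill loop, run over indices k..1 on any list of length > k, writes the revFill digits
-- (reversed) into positions 1..k and leaves the head and the tail beyond k unchanged.
theorem fill_loop (k : Nat) (s : Int) (l : List Int) (hk : k < l.length) :
    (PySem.List.pyRange (k : Int) 0 (-1)).foldl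
      (fun (st : List Int × Int) index =>
        if st.2 > 9 then (PySem.List.pySetD st.1 index 9, st.2 - 9)
        else (PySem.List.pySetD st.1 index st.2, 0))
      (l, s)
    = (l.take 1 ++ (revFill k s).1.reverse ++ l.drop (k + 1), (revFill k s).2) := by
  induction k generalizing s l with
  | zero =>
    rw [Nat.cast_zero, PySem.List.pyRange_neg_one_eq_nil (le_refl 0)]
    cases l with
    | nil => simp at hk
    | cons a t => simp [revFill]
  | succ k ih =>
    rw [show ((k + 1 : Nat) : Int) = (k : Int) + 1 by push_cast; ring,
        PySem.List.pyRange_neg_one_cons (by positivity)]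
    simp only [List.foldl_cons, add_sub_cancel_right]
    have hset : ∀ v : Int, PySem.List.pySetD l ((k : Int) + 1) v = l.set (k + 1) v := by
      intro v
      rw [show ((k : Int) + 1) = ((k + 1 : Nat) : Int) by push_cast; ring,
          PySem.List.pySetD_natCast]
    have hlen : ∀ v : Int, k < (l.set (k + 1) v).length := by
      intro v; simp only [List.length_set]; omega
    have htake : ∀ v : Int, (l.set (k + 1) v).take 1 = l.take 1 := by
      intro v
      rw [List.take_set]
      exact List.set_eq_of_length_le (by simp)
    have hdrop : ∀ v : Int, (l.set (k + 1) v).drop (k + 1) = v :: l.drop (k + 2) := by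
      intro v
      rw [List.drop_set, if_neg (by omega)]
      simp only [Nat.sub_self]
      rw [List.drop_eq_getElem_cons (by omega : k + 1 < l.length), List.set_cons_zero]
    by_cases hs : s > 9
    · rw [if_pos hs]
      rw [hset, ih (s - 9) _ (hlen 9)]
      simp only [revFill, if_pos hs, htake, hdrop, List.reverse_cons]
      simp [List.append_assoc]
    · rw [if_neg hs]
      rw [hset, ih 0 _ (hlen s)]
      simp only [revFill, if_neg hs, htake, hdrop, List.reverse_cons]
      simp [List.append_assoc]

theorem pySetD_zero_cons (x v : Int) (xs : List Int) :
    PySem.List.pySetD (x :: xs) 0 v = v :: xs := by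
  rw [show (0:Int) = ((0:Nat):Int) from rfl, PySem.List.pySetD_natCast, List.set_cons_zero]

theorem alt_eq_closedB (k : Nat) (sum : Int)
    (hg : ¬(sum > ((k+1 : Nat) : Int) * 9 ∨ (sum = 0 ∧ ((k+1 : Nat) : Int) > 1))) :
    findMin_alt ((k+1 : Nat) : Int) sum = closedB k (sum - 1) := by
  simp only [findMin_alt, if_neg hg]
  have ht : ((k+1 : Nat) : Int) - 1 = (k : Int) := by push_cast; ring
  rw [ht, PySem.Int.floordiv_eq_ediv_of_pos (by norm_num)]
  unfold closedB qB
  simp [Int.toNat_natCast]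

theorem a_eq_closedB (k : Nat) (sum : Int)
    (hg : ¬(sum > ((k+1 : Nat) : Int) * 9 ∨ (sum = 0 ∧ ((k+1 : Nat) : Int) > 1))) :
    findMin ((k+1 : Nat) : Int) sum = closedB k (sum - 1) := by
  simp only [findMin, if_neg hg]
  have ht : ((k+1 : Nat) : Int) - 1 = (k : Int) := by push_cast; ring
  rw [ht, Int.toNat_natCast,
      fill_loop k (sum - 1) (List.replicate (k+1) 0) (by simp)]
  have htake : (List.replicate (k+1) (0:Int)).take 1 = [0] := by
    simp [List.take_replicate]
  have hdrop : (List.replicate (k+1) (0:Int)).drop (k+1) = [] := by simp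
  simp only [htake, hdrop, List.append_nil, List.singleton_append, pySetD_zero_cons]
  have hL : ((k+1:Nat):Int)
      = ((((revFill k (sum-1)).2 + 1) :: (revFill k (sum-1)).1.reverse).length : Int) := by
    simp [length_revFill]
  rw [hL, PySem.List.foldl_pyRange_zero_pyGetD'
        ((((revFill k (sum-1)).2 + 1) :: (revFill k (sum-1)).1.reverse)) 0
        (fun c x => c * 10 + x) 0]
  exact b10_revFill k (sum - 1)

-- ===== VERDICT (by name: the statement is the Claim_ definition above) =====
theorem findMin_spec : Claim_equal_findMin := by
  intro dl sum _ hpre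
  unfold Spec_findMin
  by_cases hg : sum > dl * 9 ∨ (sum = 0 ∧ dl > 1)
  · unfold findMin findMin_alt
    rw [if_pos hg, if_pos hg]
  · have hd : 1 ≤ dl := by
      unfold Pre_findMin at hpre
      omega
    obtain ⟨n, rfl⟩ : ∃ n : Nat, dl = (n : Int) :=
      ⟨dl.toNat, (Int.toNat_of_nonneg (by omega)).symm⟩
    obtain ⟨k, rfl⟩ : ∃ k : Nat, n = k + 1 := ⟨n - 1, by omega⟩
    rw [a_eq_closedB k sum hg, alt_eq_closedB k sum hg]
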